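-- pv_equiv track=rewrite | github.com/LeweLotki/chess_figures | mypackages - Kopia/fun2.py | extremum
-- ===== SOURCE A (Python) =====
-- def extremum(list):
--     max_height = 0
--     min_height = 10000
--     max_width = 0
--     min_width = 10000
--     for val in list:
--         if val[0] > max_height:
--             max_height = val[0]
--         if val[0] < min_height:
--             min_height = val[0]
--         if val[1] > max_width:
--             max_width = val[1]
--         if val[1] < min_width:
--             min_width = val[1]
--     return max_height, min_height, max_width, min_width
-- ===== SOURCE B (Python) =====
-- def extremum(list):
--     heights = [v[0] for v in list]
--     widths = [v[1] for v in list]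
--     return (max(heights + [0]), min(heights + [10000]),
--             max(widths + [0]), min(widths + [10000]))
-- ===== Notes on version B (the rewrite author's own statement) =====
-- stated objective: simpler
-- what changed: Replaces the fused four-accumulator loop with two column projections and four independent max/min reductions; the appended [0]/[10000] reproduce A's seeded initial extrema exactly (including the empty list).
import Mathlib
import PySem

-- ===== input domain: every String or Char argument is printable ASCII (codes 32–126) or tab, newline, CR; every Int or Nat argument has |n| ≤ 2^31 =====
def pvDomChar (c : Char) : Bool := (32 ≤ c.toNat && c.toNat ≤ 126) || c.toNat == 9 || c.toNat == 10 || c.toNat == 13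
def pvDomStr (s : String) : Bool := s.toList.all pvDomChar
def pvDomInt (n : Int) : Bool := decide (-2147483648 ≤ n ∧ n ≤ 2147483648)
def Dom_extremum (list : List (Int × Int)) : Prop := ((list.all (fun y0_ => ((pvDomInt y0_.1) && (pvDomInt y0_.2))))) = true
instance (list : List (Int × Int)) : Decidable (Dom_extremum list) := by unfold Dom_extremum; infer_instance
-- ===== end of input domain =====

-- B replaces A's fused four-accumulator loop by two column projections and four
-- independent max/min reductions (objective: simpler).

-- ===== PORT A =====
-- one fused loop over the list, updating four accumulators with Python's ifs
def extremum (list : List (Int × Int)) : Int × Int × Int × Int :=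
  list.foldl
    (fun s val =>
      let maxH := if val.1 > s.1 then val.1 else s.1
      let minH := if val.1 < s.2.1 then val.1 else s.2.1
      let maxW := if val.2 > s.2.2.1 then val.2 else s.2.2.1
      let minW := if val.2 < s.2.2.2 then val.2 else s.2.2.2
      (maxH, minH, maxW, minW))
    (0, 10000, 0, 10000)

-- ===== PORT B =====
-- Python's max/min over a nonempty list: fold from the head
def pyMax (l : List Int) : Int :=
  match l with
  | [] => 0
  | x :: xs => xs.foldl max x

def pyMin (l : List Int) : Int :=
  match l with
  | [] => 0
  | x :: xs => xs.foldl min x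

def extremum_alt (list : List (Int × Int)) : Int × Int × Int × Int :=
  let heights := list.map (fun v => v.1)
  let widths := list.map (fun v => v.2)
  (pyMax (heights ++ [0]), pyMin (heights ++ [10000]),
   pyMax (widths ++ [0]), pyMin (widths ++ [10000]))

-- ===== PRECONDITION & SPEC =====
def Spec_extremum (list : List (Int × Int)) (out : Int × Int × Int × Int) : Prop := out = extremum_alt list
instance (list : List (Int × Int)) (out : Int × Int × Int × Int) : Decidable (Spec_extremum list out) := by unfold Spec_extremum; infer_instance

-- ===== CLAIM (what is proved, stated in full; the proofs are below) =====
def Claim_equal_extremum : Prop := ∀ (list : List (Int × Int)), Dom_extremum list → Spec_extremum list (extremum list)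

-- ===== LEMMAS AND PROOFS =====

theorem foldl_max_comm (l : List Int) : ∀ a b : Int, l.foldl max (max a b) = max a (l.foldl max b) := by
  induction l with
  | nil => intro a b; simp
  | cons x xs ih =>
    intro a b
    simp only [List.foldl_cons]
    rw [max_assoc, ih]

theorem foldl_min_comm (l : List Int) : ∀ a b : Int, l.foldl min (min a b) = min a (l.foldl min b) := by
  induction l with
  | nil => intro a b; simp
  | cons x xs ih =>
    intro a b
    simp only [List.foldl_cons]
    rw [min_assoc, ih]

theorem pyMax_append (l : List Int) (c : Int) : pyMax (l ++ [c]) = l.foldl max c := by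
  cases l with
  | nil => simp [pyMax]
  | cons x xs =>
    simp only [pyMax, List.cons_append, List.foldl_cons, List.foldl_append, List.foldl_nil]
    rw [max_comm, ← foldl_max_comm]

theorem pyMin_append (l : List Int) (c : Int) : pyMin (l ++ [c]) = l.foldl min c := by
  cases l with
  | nil => simp [pyMin]
  | cons x xs =>
    simp only [pyMin, List.cons_append, List.foldl_cons, List.foldl_append, List.foldl_nil]
    rw [min_comm, ← foldl_min_comm]

theorem if_gt_max (a v : Int) : (if v > a then v else a) = max a v := by
  simp only [max_def]; split_ifs <;> omega

theorem if_lt_min (a v : Int) : (if v < a then v else a) = min a v := by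
  simp only [min_def]; split_ifs <;> omega

theorem loop_eq (l : List (Int × Int)) : ∀ a b c d : Int,
    l.foldl
      (fun s val =>
        let maxH := if val.1 > s.1 then val.1 else s.1
        let minH := if val.1 < s.2.1 then val.1 else s.2.1
        let maxW := if val.2 > s.2.2.1 then val.2 else s.2.2.1
        let minW := if val.2 < s.2.2.2 then val.2 else s.2.2.2
        (maxH, minH, maxW, minW))
      (a, b, c, d)
    = ((l.map (fun v => v.1)).foldl max a, (l.map (fun v => v.1)).foldl min b,
       (l.map (fun v => v.2)).foldl max c, (l.map (fun v => v.2)).foldl min d) := by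
  induction l with
  | nil => intro a b c d; simp
  | cons x xs ih =>
    intro a b c d
    simp only [if_gt_max, if_lt_min] at ih ⊢
    simp only [List.foldl_cons, List.map_cons]
    exact ih _ _ _ _

-- ===== VERDICT (by name: the statement is the Claim_ definition above) =====
theorem extremum_spec : Claim_equal_extremum := by
  intro list _
  unfold Spec_extremum extremum extremum_alt
  rw [loop_eq]
  simp only [pyMax_append, pyMin_append]
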